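-- pv_equiv track=rewrite | github.com/nhungbi/algo-99-bottles | 99_bottles.py | bottle_song
-- ===== SOURCE A (Python) =====
-- def bottle_song(bottle = 99):
--
--     if bottle == 1:
--         end = """1 bottle of beer on the wall, 1 bottle of beer.
-- Take one down and pass it around, no more bottles of beer on the wall.
-- No more bottles of beer on the wall, no more bottles of beer.
-- Go to the store and buy some more, 99 bottles of beer on the wall."""
--         return end
--
--     current = f"{bottle} bottles of beer on the wall, {bottle} bottles of beer.\n" + f"Take one down and pass it around, {bottle-1} bottles of beer on the wall.\n"
--     return current + bottle_song(bottle-1)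
-- ===== SOURCE B (Python) =====
-- END = """1 bottle of beer on the wall, 1 bottle of beer.
-- Take one down and pass it around, no more bottles of beer on the wall.
-- No more bottles of beer on the wall, no more bottles of beer.
-- Go to the store and buy some more, 99 bottles of beer on the wall."""
--
--
-- def bottle_song(bottle=99):
--     parts = [
--         f"{n} bottles of beer on the wall, {n} bottles of beer.\n"
--         f"Take one down and pass it around, {n-1} bottles of beer on the wall.\n"
--         for n in range(bottle, 1, -1)
--     ]
--     parts.append(END)
--     return "".join(parts)
-- ===== Notes on version B (the rewrite author's own statement) =====
-- stated objective: idiomatic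
-- what changed: Replaces A's recursion with a list comprehension over range(bottle, 1, -1) plus an appended final verse, joined once with ''.join instead of repeated string concatenation.
import Mathlib
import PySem

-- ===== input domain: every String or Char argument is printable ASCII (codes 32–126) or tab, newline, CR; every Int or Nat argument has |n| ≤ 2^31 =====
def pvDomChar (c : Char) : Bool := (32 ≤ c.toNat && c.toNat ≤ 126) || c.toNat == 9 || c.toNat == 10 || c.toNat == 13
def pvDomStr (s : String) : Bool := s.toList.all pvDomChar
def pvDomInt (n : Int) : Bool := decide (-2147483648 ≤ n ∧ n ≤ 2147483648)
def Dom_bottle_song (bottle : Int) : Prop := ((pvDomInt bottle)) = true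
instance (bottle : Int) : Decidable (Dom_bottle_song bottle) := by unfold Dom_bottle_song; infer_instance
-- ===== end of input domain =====

-- B is the idiomatic iterative form: a comprehension of verses joined by ''.join instead of A's recursion.
-- ===== PORT A =====
def pvEndVerse : String := "1 bottle of beer on the wall, 1 bottle of beer.\nTake one down and pass it around, no more bottles of beer on the wall.\nNo more bottles of beer on the wall, no more bottles of beer.\nGo to the store and buy some more, 99 bottles of beer on the wall."

-- the two concatenated f-strings 'current' of A
def pvCurrentA (bottle : Int) : String :=
  (PySem.Int.toStr bottle ++ " bottles of beer on the wall, " ++ PySem.Int.toStr bottle ++ " bottles of beer.\n")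
  ++ ("Take one down and pass it around, " ++ PySem.Int.toStr (bottle - 1) ++ " bottles of beer on the wall.\n")

-- A's recursion; fuel = bottle.toNat makes the (for bottle ≥ 1 always sufficient) recursion structural
def bottleSongGo : Nat → Int → String
  | 0, _ => ""
  | fuel + 1, b => if b = 1 then pvEndVerse else pvCurrentA b ++ bottleSongGo fuel (b - 1)

def bottle_song (bottle : Int) : String := bottleSongGo bottle.toNat bottle

-- ===== PORT B =====
def pvVerseB (n : Int) : String :=
  PySem.Int.toStr n ++ " bottles of beer on the wall, " ++ PySem.Int.toStr n
    ++ " bottles of beer.\nTake one down and pass it around, " ++ PySem.Int.toStr (n - 1)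
    ++ " bottles of beer on the wall.\n"

def pvEndB : String := "1 bottle of beer on the wall, 1 bottle of beer.\nTake one down and pass it around, no more bottles of beer on the wall.\nNo more bottles of beer on the wall, no more bottles of beer.\nGo to the store and buy some more, 99 bottles of beer on the wall."

def bottle_song_alt (bottle : Int) : String :=
  PySem.Str.join "" ((PySem.List.pyRange bottle 1 (-1)).map pvVerseB ++ [pvEndB])

-- ===== PRECONDITION & SPEC =====
-- A recurses past 1 and raises RecursionError for bottle ≤ 0; those inputs are excluded.
def Pre_bottle_song (bottle : Int) : Prop := 1 ≤ bottle
instance (bottle : Int) : Decidable (Pre_bottle_song bottle) := by unfold Pre_bottle_song; infer_instance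
def pvWitness_bottle_song : Int := (3)

def Spec_bottle_song (bottle : Int) (out : String) : Prop := out = bottle_song_alt bottle
instance (bottle : Int) (out : String) : Decidable (Spec_bottle_song bottle out) := by unfold Spec_bottle_song; infer_instance

-- ===== CLAIM (what is proved, stated in full; the proofs are below) =====
def Claim_equal_bottle_song : Prop := ∀ (bottle : Int), Dom_bottle_song bottle → Pre_bottle_song bottle → Spec_bottle_song bottle (bottle_song bottle)

-- ===== LEMMAS AND PROOFS =====
lemma join_empty_cons (x : String) (l : List String) :
    PySem.Str.join "" (x :: l) = x ++ PySem.Str.join "" l := by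
  rw [← String.toList_inj]
  simp [PySem.Str.join, PySem.Chars.join, List.intercalate]
  cases l <;> simp

lemma verseB_eq_currentA (b : Int) : pvVerseB b = pvCurrentA b := by
  rw [← String.toList_inj]
  simp [pvCurrentA, pvVerseB]

lemma alt_one : bottle_song_alt 1 = pvEndVerse := by
  unfold bottle_song_alt
  rw [PySem.List.pyRange_neg_one_eq_nil (by omega)]
  rw [List.map_nil, List.nil_append, join_empty_cons]
  rw [← String.toList_inj]
  simp [PySem.Str.join, PySem.Chars.join, List.intercalate, pvEndB, pvEndVerse]

lemma alt_step (b : Int) (hb : 2 ≤ b) :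
    bottle_song_alt b = pvCurrentA b ++ bottle_song_alt (b - 1) := by
  unfold bottle_song_alt
  rw [PySem.List.pyRange_neg_one_cons (by omega : (1:Int) < b)]
  rw [List.map_cons, List.cons_append, join_empty_cons, verseB_eq_currentA]

lemma go_eq : ∀ (n : Nat) (b : Int), b.toNat = n → 1 ≤ b → bottleSongGo n b = bottle_song_alt b := by
  intro n
  induction n with
  | zero => intro b h h1; omega
  | succ m ih =>
    intro b h h1
    by_cases hb1 : b = 1
    · subst hb1; simpa [bottleSongGo] using (alt_one).symm
    · have hb2 : 2 ≤ b := by omega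
      simp only [bottleSongGo, if_neg hb1]
      rw [ih (b - 1) (by omega) (by omega), alt_step b hb2]

-- ===== VERDICT (by name: the statement is the Claim_ definition above) =====
theorem bottle_song_spec : Claim_equal_bottle_song := by
  intro b _ hpre
  unfold Spec_bottle_song bottle_song
  exact go_eq b.toNat b rfl hpre
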